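/- GENERATED by tools/from_farm_form.py from prooffarm-gif/accepted/digest_file.7/Proof.lean (a worked proof of the farm's unit `digest_file.7`,
   accepted by the verdict) — do not edit. -/
import Gif.Spec.Units.digest_file_7
import Gif.Spec.AllSegs

namespace Gif.Spec.digest_file_7
open X86 X86.User Asan ProgX.Base ProgX.Base.Spec Gif.Spec

set_option maxRecDepth 4000 in
set_option maxHeartbeats 4000000 in
/-- **1059BAH … 1059E4H** (gif_driver.c:172): the checked loads of `gif->ExtensionBlocks` and `gif->ExtensionBlockCount`,
`digest_extensions(h, count, blocks)` of the pending list; `At` again at the call's return address `ret35`. -/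
theorem seg7_call (Lay : Layout) (hLay : Lay.hi = 0x1000000) (μ : Microarch) (hμ : UserX.MicroOK μ) (u₀ : State)
    (hcode : HasCodeNat Lay u₀ Gif.L.digest_file.entry Gif.Code.code_digest_file.nat Gif.L.digest_file.size)
    (H : Heap) (rest : List Obj) (frames : List (Nat × FrameLayout)) (F : Forest) (R : Rd) (e : State) (ret : Word)
    (hext : Calls Lay μ ProgX.Base.WayInv (ProgX.Base.conv u₀) Gif.L.digest_extensions.entry
      (Gif.Spec.digest_extensions.spec H rest frames F.pend))
    (h_load8 : Asan.SmallCheck Lay μ ProgX.Base.WayInv (ProgX.Base.CodeOK u₀) [.rax, .rcx, .rdx] 8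
      ProgX.Base.L.__asan_load8_noabort.entry)
    (h_load4 : Asan.SmallCheck Lay μ ProgX.Base.WayInv (ProgX.Base.CodeOK u₀) [.rax, .rcx, .rdx] 4
      ProgX.Base.L.__asan_load4_noabort.entry)
    (v : State) (hat : digest_file.At Gif.L.digest_file.at_1059ba H rest frames F R u₀ e ret v) :
    ReachVia Lay μ WayInv v (digest_file.At Gif.L.digest_file.ret35 H rest frames F R u₀ e ret) := by
  -- 1. the entry's facts, the precondition
  have he := hat.entry
  v_entry he
  obtain ⟨henv, hcomp, hrdi, hpix, hpix_lo, hpix_hi⟩ := hat.pre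
  have hbase := henv.heap.base
  have hok := hat.inv.heap
  have hcur := henv.ctx.cursor_range henv.heap.inv.shadow
  -- where gif is, as numbers; that it is live
  obtain ⟨hg1, hg2, hg3⟩ := hat.ok.gif_where hok hbase
  have hgl : LiveIn (H.liveObjs ++ rest) frames F.gif 120 := hat.ok.gif_live.liveIn rest frames (Nat.le_refl _) (Nat.le_refl _)
  -- 2. the present state, in the walker's names
  have w_rip := hat.rip
  have c_rsp : v.reg .rsp = e.reg .rsp - 88 := hat.rsp
  have c_r12 : v.reg .r12 = UInt64.ofNat F.gif := by
    rw [hat.r12]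
    exact Word.eq_ofNat_of_toNat hrdi
  have w_eq : Mem.EqOn ProgX.Base.L.textLo ProgX.Base.L.textHi u₀.mem v.mem := ProgX.Base.conv_code_eqOn hat.code
  have hdf : v.flags .df = false := (show abiInv _ from hat.abi).1
  have hmx : v.mxcsr &&& 0x1F80 = 0x1F80 := (show abiInv _ from hat.abi).2
  have hsse := ProgX.Base.sseOK_of_abiInv hat.abi
  have w_kept : RegsKept [.rsp] v v := RegsKept.refl _ _
  u_walk hcode [hμ.vendor] until [Gif.L.digest_file.ret35]
    span [ProgX.Base.L.textLo, ProgX.Base.L.textHi] side (v_side)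
  case check_1059bf =>
    -- 0x1059bf, gif_driver.c:172: the check of the load `gif->ExtensionBlocks`: inside the object `(F.gif, 120)`
    have hun : ShadowUntouched v.mem s_1059bf.mem := by v_untouched
    exact hgl.accSmall hat.inv.shadow hun _ 8 (by decide) (by u_omega) (by u_omega)
  case check_1059ce =>
    -- 0x1059ce, gif_driver.c:172: the check of the load `gif->ExtensionBlockCount`: inside the object `(F.gif, 120)`
    have hun : ShadowUntouched v.mem s_1059ce.mem := by v_untouched
    exact hgl.accSmall hat.inv.shadow hun _ 4 (by decide) (by u_omega) (by u_omega)
  case call_inv =>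
    have x_df : s_1059df.flags .df = false := by
      rw [w_flags]
      exact w_df_1059ce
    have x_mx : s_1059df.mxcsr &&& 0x1F80 = 0x1F80 := by
      rw [w_mxcsr]
      exact hmx
    exact ProgX.Base.abiInv_of x_df x_mx
  case pre_1059df =>
    -- 0x1059df, gif_driver.c:172: digest_extensions' precondition: the heap over the pushed return address, the pending list
    have hsame : Mem.SameExcept [⟨(e.reg .rsp).toNat - 96, (e.reg .rsp).toNat - 88⟩] v.mem s_1059df.mem := by
      rw [w_mem]
      u_same
    have hok' : GifOK H F R s_1059df.mem := by
      refine hat.ok.sameExcept hok ⟨hcur.1, hcur.2.1⟩ hsame ?_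
      intro w hw
      have hw_eq := List.mem_singleton.mp hw
      rw [hw_eq]
      apply Loose.stack hok
      · simp only
        omega
      · simp only
        omega
      · simp only
        omega
    have hpend := hok'.shape.pend
    -- the pushed return address lies below gif: the two fields are the ones loaded from `v.mem`
    have hmiss : ∀ (a n : Nat), F.gif ≤ a → ∀ w, w ∈ ([⟨(e.reg .rsp).toNat - 96, (e.reg .rsp).toNat - 88⟩] : List Span) →
        a + n ≤ w.lo ∨ w.hi ≤ a := by
      intro a n ha w hw
      have hw_eq := List.mem_singleton.mp hw
      rw [hw_eq]
      right
      simp only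
      omega
    have e_eb : GifFileType.ExtensionBlocks s_1059df.mem F.gif = (s_1059df.reg .rdx).toNat := by
      simp only [gfield]
      rw [hsame.rd (F.gif + 88) 8 (by omega) (hmiss _ 8 (by omega))]
      rw [w_rdx, rd_eq_readLE v.mem (UInt64.ofNat F.gif + 88) (F.gif + 88) 8 (by u_omega)]
      have hlt := rd_lt v.mem (F.gif + 88) 8
      exact (toNat_ofNat_addr _ (by omega)).symm
    have e_ebc : GifFileType.ExtensionBlockCount s_1059df.mem F.gif = (s_1059df.reg .rsi).toNat % 2 ^ 32 := by
      simp only [gfield]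
      rw [hsame.rd (F.gif + 80) 4 (by omega) (hmiss _ 4 (by omega))]
      rw [w_rsi, rd_eq_readLE v.mem (UInt64.ofNat F.gif + 80) (F.gif + 80) 4 (by u_omega)]
      have hlt := rd_lt v.mem (F.gif + 80) 4
      rw [toNat_ofBV32, BitVec.toNat_ofNat]
      omega
    refine ⟨?_, ?_, digest_file.owns_pend hat.ok⟩
    · exact HeapPre.at_push henv.heap (SameRegion.refl H) hat.inv w_rsp w_mem (by u_omega)
    · rw [← e_eb, ← e_ebc]
      exact hpend
  -- 0x1059e4: digest_extensions HAS RETURNED: it wrote stack only (128 bytes below its return address), and no shadow byte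
  have hun0 : ShadowUntouched v.mem s_1059df.mem := by v_untouched
  have hpost : ShadowUntouched s_1059df.mem s_1059dfr.mem := w_post
  have hun : ShadowUntouched v.mem s_1059dfr.mem := Mem.EqOn.trans hun0 hpost
  v_after_call w_rsp_1059df w_mem_1059df
  have hsame1 : Mem.SameExcept [⟨(e.reg .rsp).toNat - 224, (e.reg .rsp).toNat - 64⟩] v.mem s_1059dfr.mem := by u_same
  -- `At` at the returned state
  have hat' := hat.carry (cut' := Gif.L.digest_file.ret35) w_rip w_rsp (w_kept.get .r12 rfl) w_code w_inv hun hsame1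
  exact ReachVia.done hat'

set_option maxRecDepth 4000 in
set_option maxHeartbeats 4000000 in
/-- **1059E4H … the `ret`** (gif_driver.c:172-175): `rbx = h`, `r15 = pixels` from its slot, THE CHECKED STORE `*pixels = total`,
`rax = h`, `add rsp, 40`, the six pops, `ret`: the contract's `Returned`. -/
theorem seg7_tail (Lay : Layout) (hLay : Lay.hi = 0x1000000) (μ : Microarch) (hμ : UserX.MicroOK μ) (u₀ : State)
    (hcode : HasCodeNat Lay u₀ Gif.L.digest_file.entry Gif.Code.code_digest_file.nat Gif.L.digest_file.size)
    (H : Heap) (rest : List Obj) (frames : List (Nat × FrameLayout)) (F : Forest) (R : Rd) (e : State) (ret : Word)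
    (h_store8 : Asan.SmallCheck Lay μ ProgX.Base.WayInv (ProgX.Base.CodeOK u₀) [.rax, .rcx, .rdx] 8
      ProgX.Base.L.__asan_store8_noabort.entry)
    (v : State) (hat : digest_file.At Gif.L.digest_file.ret35 H rest frames F R u₀ e ret v) :
    ReachVia Lay μ WayInv v (Returned (conv u₀) (digest_file.spec H rest frames F R) e ret) := by
  -- 1. the entry's facts, the precondition; `*pixels` lies above the return address
  have he := hat.entry
  v_entry he
  have habove := digest_file.pixels_above hat.pre
  obtain ⟨henv, hcomp, hrdi, hpix, hpix_lo, hpix_hi⟩ := hat.pre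
  -- 2. the present state, in the walker's names
  have w_rip := hat.rip
  have c_rsp : v.reg .rsp = e.reg .rsp - 88 := hat.rsp
  have w_eq : Mem.EqOn ProgX.Base.L.textLo ProgX.Base.L.textHi u₀.mem v.mem := ProgX.Base.conv_code_eqOn hat.code
  have hdf : v.flags .df = false := (show abiInv _ from hat.abi).1
  have hmx : v.mxcsr &&& 0x1F80 = 0x1F80 := (show abiInv _ from hat.abi).2
  have hsse := ProgX.Base.sseOK_of_abiInv hat.abi
  have w_kept : RegsKept [.rsp] v v := RegsKept.refl _ _
  -- 3. the slots the segment loads, in the form the walker rewrites with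
  have k_pix : UInt64.ofNat (v.mem.readLE (e.reg .rsp - 64) 8) = e.reg .rsi := by
    rw [hat.slot_pixels, UInt64.ofNat_toNat]
  have k_rbx : UInt64.ofNat (v.mem.readLE (e.reg .rsp - 48) 8) = e.reg .rbx := by
    rw [hat.slot_rbx, UInt64.ofNat_toNat]
  have k_rbp : UInt64.ofNat (v.mem.readLE (e.reg .rsp - 40) 8) = e.reg .rbp := by
    rw [hat.slot_rbp, UInt64.ofNat_toNat]
  have k_r12 : UInt64.ofNat (v.mem.readLE (e.reg .rsp - 32) 8) = e.reg .r12 := by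
    rw [hat.slot_r12, UInt64.ofNat_toNat]
  have k_r13 : UInt64.ofNat (v.mem.readLE (e.reg .rsp - 24) 8) = e.reg .r13 := by
    rw [hat.slot_r13, UInt64.ofNat_toNat]
  have k_r14 : UInt64.ofNat (v.mem.readLE (e.reg .rsp - 16) 8) = e.reg .r14 := by
    rw [hat.slot_r14, UInt64.ofNat_toNat]
  have k_r15 : UInt64.ofNat (v.mem.readLE (e.reg .rsp - 8) 8) = e.reg .r15 := by
    rw [hat.slot_r15, UInt64.ofNat_toNat]
  have k_ra : UInt64.ofNat (v.mem.readLE (e.reg .rsp) 8) = ret := hat.slot_ra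
  -- 4. the walk, over the `ret`
  u_walk hcode [hμ.vendor] span [ProgX.Base.L.textLo, ProgX.Base.L.textHi] side (v_side)
  case check_1059ef =>
    -- 0x1059ef, gif_driver.c:173: the check of the store `*pixels = total`: the 8 live bytes of the precondition
    have hun : ShadowUntouched v.mem s_1059ef.mem := by v_untouched
    exact hpix.accSmall hat.inv.shadow hun _ 8 (by decide) (by u_omega) (by u_omega)
  -- 5. 0x105a0d: the `ret` has been executed
  have x_df : s_105a0d.flags .df = false := by
    rw [w_flags, X86.User.df_setStatus]
    exact w_df_1059ef
  have x_mx : s_105a0d.mxcsr &&& 0x1F80 = 0x1F80 := by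
    rw [w_mxcsr]
    exact hmx
  have habi : (conv u₀).inv s_105a0d := ProgX.Base.abiInv_of x_df x_mx
  have hun : ShadowUntouched v.mem s_105a0d.mem := by v_untouched
  refine ReachVia.done ?_
  refine X86.User.Returned.mk w_rip w_rsp ?_ ?_ (ProgX.Base.conv_code_in w_eq) habi ?_
  · -- saved: rbx, rbp, r12 … r15 popped back
    intro r hr
    cases r <;> first
      | exact absurd hr (by decide)
      | (with_reducible assumption)
  · -- same: the return address of the check call (own stack) and `*pixels` (the contract's window)
    simp only [X86.User.Spec.footprint, vspec]
    have hsame0 := hat.same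
    rw [w_mem]
    u_same
  · -- the postcondition: no shadow byte was written
    exact Mem.EqOn.trans hat.un hun

end Gif.Spec.digest_file_7

/-- Segment 7 of `digest_file` (1059BAH … the `ret`; gif_driver.c:172-175): from `At` behind the image loop, through
`digest_extensions` of the pending list (`seg7_call`, to the call's return address) and the checked store `*pixels = total`
with the epilogue (`seg7_tail`), to the contract's `Returned`. -/
theorem Gif.Spec.Proved.digest_file_7_ok : Gif.Spec.digest_file_7.Statement := by
  unfold Gif.Spec.digest_file_7.Statement
  intro Lay hLay μ hμ u₀ hcode h_ext h_load8 h_load4 h_store8 H rest frames F R e ret v hat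
  -- digest_extensions' contract for the entry's heap and frames and the pending list
  have hext := h_ext H rest frames F.pend
  -- 0x1059ba … the call … 0x1059e4
  refine (Gif.Spec.digest_file_7.seg7_call Lay hLay μ hμ u₀ hcode H rest frames F R e ret hext h_load8 h_load4 v hat).trans ?_
  -- 0x1059e4 … the `ret`
  intro v1 hv1
  exact Gif.Spec.digest_file_7.seg7_tail Lay hLay μ hμ u₀ hcode H rest frames F R e ret h_store8 v1 hv1
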